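-- pv_equiv track=rewrite | github.com/shpigunov/prjctr-algo-base-hangman | functions.py | filter_words_by_mask
-- ===== SOURCE A (Python) =====
-- def filter_words_by_mask(words: list, mask: str) -> list:
--     """Filter word list to a subset only matching known
--     characters in a word mask
--
--     Mask format: 'ch*r*cter'"""
--
--     res = []                # resulting list
--     mask_len = len(mask)    # mask length for reuse
--
--     for word in words:
--         include = True
--         # Only include words that are the same length as mask
--         if len(word) == mask_len:
--             for j in range(0, mask_len):
--                 if mask[j] != word[j] and mask[j] != '*':
--                     include = False
--                     break
--         else:
--             include = False
--
--         if include: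
--             res.append(word)
--
--     return res
-- ===== SOURCE B (Python) =====
-- def filter_words_by_mask(words: list, mask: str) -> list:
--     """Filter word list to words matching a wildcard mask ('*' matches any char).
--
--     Staged filtering: keep only words of the mask's length, then narrow the
--     candidate list once per fixed (non-'*') mask position. Filtering is stable,
--     so the original word order is preserved."""
--     candidates = [w for w in words if len(w) == len(mask)]
--     for j, ch in enumerate(mask):
--         if ch != '*':
--             candidates = [w for w in candidates if w[j] == ch]
--     return candidates
-- ===== Notes on version B (the rewrite author's own statement) =====
-- stated objective: alternative
-- what changed: Inverts the traversal: instead of A's word-outer scan with a char-by-char inner loop and a break flag, B first keeps the words of the mask's length and then makes one stable filtering pass over the candidate list per fixed (non-'*') mask position, narrowing the candidates stage by stage.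
import Mathlib
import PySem

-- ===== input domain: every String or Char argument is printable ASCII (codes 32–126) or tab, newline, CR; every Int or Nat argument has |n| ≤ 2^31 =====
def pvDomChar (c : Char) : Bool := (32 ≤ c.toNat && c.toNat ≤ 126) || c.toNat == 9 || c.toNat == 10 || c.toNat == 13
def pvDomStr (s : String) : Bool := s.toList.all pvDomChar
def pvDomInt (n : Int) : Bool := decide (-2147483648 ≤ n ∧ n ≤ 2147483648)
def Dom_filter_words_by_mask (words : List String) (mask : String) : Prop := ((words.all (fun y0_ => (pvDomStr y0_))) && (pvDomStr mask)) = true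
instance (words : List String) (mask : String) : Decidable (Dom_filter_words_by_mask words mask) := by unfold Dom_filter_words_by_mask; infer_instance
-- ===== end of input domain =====

-- B inverts the traversal: it keeps the words of the mask's length and then narrows the
-- candidate list once per fixed (non-'*') mask position, instead of A's word-outer scan
-- with a char-by-char inner loop and break flag (objective: alternative).

-- ===== PORT A =====
-- Inner 'for j in range(0, mask_len)' with break: returns the final 'include' flag.
-- Indexing mask[j]/word[j] is via getD; it is only reached with j < length, so the default is never used.
def pvLoopA (ml wl : List Char) (n j : Nat) : Bool :=
  if j < n then
    if ml.getD j ' ' ≠ wl.getD j ' ' ∧ ml.getD j ' ' ≠ '*' then false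
    else pvLoopA ml wl n (j + 1)
  else true
termination_by n - j

def filter_words_by_mask (words : List String) (mask : String) : List String :=
  let mask_len := mask.toList.length
  words.foldl (fun res word =>
    let include_ : Bool :=
      if word.toList.length = mask_len then pvLoopA mask.toList word.toList mask_len 0
      else false
    if include_ then res ++ [word] else res) []

-- ===== PORT B =====
-- 'for j, ch in enumerate(mask): if ch != '*': candidates = [w for w in candidates if w[j] == ch]'.
-- w[j] is via pyGetD; every candidate has the mask's length and j < len(mask), so it is in range.
def filter_words_by_mask_alt (words : List String) (mask : String) : List String :=
  let candidates := words.filter (fun w => w.toList.length == mask.toList.length)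
  (PySem.List.enumerate mask.toList).foldl
    (fun cand p =>
      if p.2 ≠ '*' then cand.filter (fun w => PySem.List.pyGetD w.toList p.1 ' ' == p.2)
      else cand)
    candidates

-- ===== PRECONDITION & SPEC =====
def Spec_filter_words_by_mask (words : List String) (mask : String) (out : List String) : Prop := out = filter_words_by_mask_alt words mask
instance (words : List String) (mask : String) (out : List String) : Decidable (Spec_filter_words_by_mask words mask out) := by unfold Spec_filter_words_by_mask; infer_instance

-- ===== CLAIM (what is proved, stated in full; the proofs are below) =====
def Claim_equal_filter_words_by_mask : Prop := ∀ (words : List String) (mask : String), Dom_filter_words_by_mask words mask → Spec_filter_words_by_mask words mask (filter_words_by_mask words mask)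

-- ===== LEMMAS AND PROOFS =====

-- A's inner loop from position j equals the zip/all test over the remaining positions.
theorem pvLoopA_eq_all (ml wl : List Char) (n : Nat) (hm : ml.length = n) (hw : wl.length = n) :
    ∀ j, pvLoopA ml wl n j = ((ml.zip wl).drop j).all (fun p => p.1 == '*' || p.1 == p.2) := by
  have hz : (ml.zip wl).length = n := by simp [List.length_zip, hm, hw]
  intro j
  induction hj : n - j using Nat.strong_induction_on generalizing j with
  | _ k ih =>
    unfold pvLoopA
    by_cases h : j < n
    · have hjz : j < (ml.zip wl).length := by omega
      rw [List.drop_eq_getElem_cons hjz]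
      have hjm : j < ml.length := by omega
      have hjw : j < wl.length := by omega
      have hg : (ml.zip wl)[j] = (ml[j], wl[j]) := by simp
      have hrec : pvLoopA ml wl n (j + 1)
          = ((ml.zip wl).drop (j + 1)).all (fun p => p.1 == '*' || p.1 == p.2) := by
        exact ih (n - (j + 1)) (by omega) (j + 1) rfl
      simp only [h, if_true, List.getD_eq_getElem ml ' ' hjm, List.getD_eq_getElem wl ' ' hjw,
        List.all_cons, hg]
      by_cases hc : ml[j] ≠ wl[j] ∧ ml[j] ≠ '*'
      · simp [hc.1, hc.2]
      · rw [if_neg hc, hrec]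
        by_cases hstar : ml[j] = '*'
        · simp [hstar]
        · have heq : ml[j] = wl[j] := by
            by_contra hne
            exact hc ⟨hne, hstar⟩
          simp [heq]
    · have : (ml.zip wl).drop j = [] := by
        apply List.drop_eq_nil_of_le; omega
      simp [h, this]

-- B's staged narrowing loop collapses to one filter with the conjunction over all positions.
theorem foldl_filter_stage (f : Int × Char → String → Bool) :
    ∀ (js : List (Int × Char)) (init : List String),
      js.foldl (fun cand p => if p.2 ≠ '*' then cand.filter (f p) else cand) init
        = init.filter (fun w => js.all (fun p => p.2 == '*' || f p w)) := by
  intro js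
  induction js with
  | nil => intro init; simp
  | cons p js ih =>
    intro init
    simp only [List.foldl_cons, List.all_cons]
    by_cases hs : p.2 = '*'
    · rw [if_neg (fun hc => hc hs), ih]
      apply List.filter_congr
      intro w _; simp [hs]
    · rw [if_pos hs, ih, List.filter_filter]
      apply List.filter_congr
      intro w _
      have hb : (p.2 == '*') = false := by simp [hs]
      rw [hb, Bool.false_or, Bool.and_comm]

-- For a word of the mask's length, the per-position tests over enumerate(mask) agree with
-- the zip/all test that characterises A's inner loop.
theorem enumerate_all_eq_zip_all (ml wl : List Char) (h : wl.length = ml.length) :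
    (PySem.List.enumerate ml).all
        (fun p => p.2 == '*' || PySem.List.pyGetD wl p.1 ' ' == p.2)
      = (ml.zip wl).all (fun p => p.1 == '*' || p.1 == p.2) := by
  rw [Bool.eq_iff_iff]
  simp only [List.all_eq_true]
  constructor
  · intro hall q hq
    obtain ⟨k, hk, hq'⟩ := List.mem_iff_getElem.mp hq
    have hkm : k < ml.length := by simp [List.length_zip, h] at hk; omega
    have hkw : k < wl.length := by simp [List.length_zip, h] at hk; omega
    have := hall (0 + (k : Int), ml[k]) (by
      rw [PySem.List.mem_enumerate_iff]; exact ⟨k, hkm, rfl⟩)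
    simp only [PySem.List.pyGetD_natCast, zero_add] at this
    rw [List.getD_eq_getElem wl ' ' hkw] at this
    have hg : (ml.zip wl)[k] = (ml[k], wl[k]) := by simp
    have h2 : ml[k] = '*' ∨ wl[k] = ml[k] := by simpa using this
    rw [← hq', hg]
    rcases h2 with h2 | h2
    · simp [h2]
    · simp [h2]
  · intro hall p hp
    rw [PySem.List.mem_enumerate_iff] at hp
    obtain ⟨k, hk, hp'⟩ := hp
    have hkw : k < wl.length := by omega
    have hkz : k < (ml.zip wl).length := by simp [List.length_zip, h]; omega
    have := hall (ml.zip wl)[k] (List.getElem_mem hkz)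
    have hg : (ml.zip wl)[k] = (ml[k], wl[k]) := by simp
    rw [hg] at this
    subst hp'
    simp only [PySem.List.pyGetD_natCast, zero_add]
    have h2 : ml[k] = '*' ∨ ml[k] = wl[k] := by simpa using this
    rw [List.getD_eq_getElem wl ' ' hkw]
    rcases h2 with h2 | h2
    · simp [h2]
    · simp [h2]

-- ===== VERDICT (by name: the statement is the Claim_ definition above) =====
theorem filter_words_by_mask_spec : Claim_equal_filter_words_by_mask := by
  intro words mask _
  unfold Spec_filter_words_by_mask filter_words_by_mask filter_words_by_mask_alt
  rw [PySem.List.foldl_append_if_eq_filter, foldl_filter_stage]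
  simp only [List.nil_append, List.filter_filter]
  apply List.filter_congr
  intro w _
  by_cases hl : w.toList.length = mask.toList.length
  · simp only [hl, if_pos, beq_self_eq_true, Bool.and_true]
    rw [pvLoopA_eq_all mask.toList w.toList mask.toList.length rfl hl 0,
      enumerate_all_eq_zip_all mask.toList w.toList hl]
    simp
  · have hl' : ¬ w.length = mask.length := by
      simpa [← String.length_toList] using hl
    simp [hl']
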